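-- pv_equiv track=rewrite | github.com/MakiyaCro/Cryptography-2021 | ADFGX/main.py | sort_row
-- ===== SOURCE A (Python) =====
-- def sort_row(key, row_l):
--     t_row_l = row_l
--     key_l = []
--
--     # builds a list from the key string
--     for i in key:
--         key_l.append(i)
--
--     # walks through and sorts the key alphabetically while swapping row locations
--     for i in range(len(key_l)):
--         j = i
--         while j > 0:
--             # general swap
--             if ord(key_l[j]) < ord(key_l[j - 1]):
--                 a = t_row_l[j - 1]
--                 b = t_row_l[j]
--                 t_row_l[j - 1] = b
--                 t_row_l[j] = a
--
--                 a = key_l[j - 1]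
--                 b = key_l[j]
--                 key_l[j - 1] = b
--                 key_l[j] = a
--             j = j - 1
--
--     return t_row_l
-- ===== SOURCE B (Python) =====
-- def sort_row(key, row_l):
--     # Stable bucket sort: group rows by their key character, then concatenate
--     # the buckets in sorted character order; mutates row_l in place like A.
--     buckets = {}
--     for c, r in zip(key, row_l):
--         buckets[c] = buckets.get(c, []) + [r]
--     result = []
--     for c in sorted(buckets):
--         result += buckets[c]
--     row_l[:len(key)] = result
--     return row_l
-- ===== Notes on version B (the rewrite author's own statement) =====
-- stated objective: faster
-- what changed: Replaces the adjacent-swap insertion sort over parallel key/row lists with a one-pass bucket grouping by key character followed by concatenating the buckets in sorted character order (stable by construction).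
import Mathlib
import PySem

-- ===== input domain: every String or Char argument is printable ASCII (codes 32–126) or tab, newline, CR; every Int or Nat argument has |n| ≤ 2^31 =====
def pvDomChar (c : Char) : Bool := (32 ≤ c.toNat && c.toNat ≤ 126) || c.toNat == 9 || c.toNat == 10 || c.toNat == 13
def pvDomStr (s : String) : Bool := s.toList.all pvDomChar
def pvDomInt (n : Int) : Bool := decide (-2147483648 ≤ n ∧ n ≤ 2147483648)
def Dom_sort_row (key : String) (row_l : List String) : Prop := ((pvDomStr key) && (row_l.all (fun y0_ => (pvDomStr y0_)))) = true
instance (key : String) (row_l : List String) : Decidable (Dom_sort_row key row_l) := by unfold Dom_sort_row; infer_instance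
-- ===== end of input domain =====

-- B replaces A's quadratic adjacent-swap insertion sort by a one-pass bucket grouping followed by
-- concatenating the buckets in sorted key-character order (objective: faster).
-- A mutates row_l in place (B's Python does the same); the equivalence proved here is about the RETURN value.

-- ===== PORT A =====
-- inner 'while j > 0' loop of A; list reads t_row_l[j] / key_l[j] are ported with getD, which is
-- exact whenever the index is in range (guaranteed under Pre_; Python raises IndexError outside).
def pvInnerA (j : Nat) (st : List String × List Char) : List String × List Char :=
  match j with
  | 0 => st
  | j' + 1 =>
    let row := st.1
    let kl := st.2
    let st' :=
      if (kl.getD (j' + 1) ' ').toNat < (kl.getD j' ' ').toNat then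
        let a := row.getD j' ""
        let b := row.getD (j' + 1) ""
        let row' := (row.set j' b).set (j' + 1) a
        let a' := kl.getD j' ' '
        let b' := kl.getD (j' + 1) ' '
        let kl' := (kl.set j' b').set (j' + 1) a'
        (row', kl')
      else st
    pvInnerA j' st'

def sort_row (key : String) (row_l : List String) : List String :=
  -- 'for i in key: key_l.append(i)'
  let key_l := key.toList.foldl (fun acc c => acc ++ [c]) []
  -- 'for i in range(len(key_l)): j = i; while j > 0: … ; j = j - 1'
  let st := (List.range key_l.length).foldl (fun st i => pvInnerA i st) (row_l, key_l)
  st.1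

-- ===== PORT B =====
def sort_row_alt (key : String) (row_l : List String) : List String :=
  -- 'for c, r in zip(key, row_l): buckets[c] = buckets.get(c, []) + [r]'
  let buckets := (key.toList.zip row_l).foldl
      (fun d p => d.modify p.1 [] (fun v => v ++ [p.2])) PySem.Dict.empty
  -- 'for c in sorted(buckets): result += buckets[c]'
  let result := (PySem.List.sorted buckets.keys (fun c => c) false).foldl
      (fun acc c => acc ++ buckets.getD c []) []
  -- 'row_l[:len(key)] = result; return row_l'
  result ++ PySem.List.slice row_l (some (PySem.Str.len key)) none

-- ===== PRECONDITION & SPEC =====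
-- Pre_ excludes exactly the inputs on which A raises IndexError: a key character at a position
-- ≥ len(row_l) that is smaller than some earlier key character makes A swap through a row index
-- that is out of range. (When len(key) ≤ len(row_l) the condition is vacuous.)
def Pre_sort_row (key : String) (row_l : List String) : Prop :=
  ∀ i, i < key.toList.length → row_l.length ≤ i → ∀ j, j < i →
    key.toList.getD j ' ' ≤ key.toList.getD i ' '
instance (key : String) (row_l : List String) : Decidable (Pre_sort_row key row_l) := by
  unfold Pre_sort_row; infer_instance

def pvWitness_sort_row : String × List String := ("bab", ["x", "y", "z"])

def Spec_sort_row (key : String) (row_l : List String) (out : List String) : Prop := out = sort_row_alt key row_l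
instance (key : String) (row_l : List String) (out : List String) : Decidable (Spec_sort_row key row_l out) := by unfold Spec_sort_row; infer_instance

-- ===== CLAIM (what is proved, stated in full; the proofs are below) =====
def Claim_equal_sort_row : Prop := ∀ (key : String) (row_l : List String), Dom_sort_row key row_l → Pre_sort_row key row_l → Spec_sort_row key row_l (sort_row key row_l)


-- ===== LEMMAS AND PROOFS =====

-- A's inner loop, restated on the zipped (key char, row entry) pairs
def pvInnerP (j : Nat) (zs : List (Char × String)) : List (Char × String) :=
  match j with
  | 0 => zs
  | j' + 1 =>
    let zs' :=
      if (zs.getD (j' + 1) (' ', "")).1.toNat < (zs.getD j' (' ', "")).1.toNat then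
        (zs.set j' (zs.getD (j' + 1) (' ', ""))).set (j' + 1) (zs.getD j' (' ', ""))
      else zs
    pvInnerP j' zs'

theorem pvCharLt (a b : Char) : (a.toNat < b.toNat) ↔ a < b := by
  rw [Char.lt_def, UInt32.lt_iff_toNat_lt]; rfl

theorem pvLengthInnerP (j : Nat) (zs : List (Char × String)) :
    (pvInnerP j zs).length = zs.length := by
  induction j generalizing zs with
  | zero => rfl
  | succ j ih =>
    rw [pvInnerP]
    split <;> simp [ih]

theorem pvLengthFold (js : List Nat) (zs : List (Char × String)) :
    (js.foldl (fun st j => pvInnerP j st) zs).length = zs.length := by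
  induction js generalizing zs with
  | nil => rfl
  | cons j js ih => simp only [List.foldl_cons]; rw [ih, pvLengthInnerP]

theorem pvZipSet (j : Nat) (k : List Char) (r : List String) (c : Char) (s : String) :
    (k.set j c).zip (r.set j s) = (k.zip r).set j (c, s) := by
  induction j generalizing k r with
  | zero => cases k <;> cases r <;> simp
  | succ j ih => cases k <;> cases r <;> simp [ih]

theorem pvMapSndZip (k : List Char) (r : List String) :
    (k.zip r).map Prod.snd = r.take (k.zip r).length := by
  induction k generalizing r with
  | nil => simp
  | cons a k ih => cases r with
    | nil => simp
    | cons b r => simp [ih]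

theorem pvMapFstZip (k : List Char) (r : List String) :
    (k.zip r).map Prod.fst = k.take (k.zip r).length := by
  induction k generalizing r with
  | nil => simp
  | cons a k ih => cases r with
    | nil => simp
    | cons b r => simp [ih]

theorem pvZipFstSnd (zs : List (Char × String)) :
    (zs.map Prod.fst).zip (zs.map Prod.snd) = zs := by
  induction zs with
  | nil => rfl
  | cons p zs ih => simp [ih]

theorem pvGetDZip (k : List Char) (r : List String) (j : Nat)
    (hk : j < k.length) (hr : j < r.length) :
    (k.zip r).getD j (' ', "") = (k.getD j ' ', r.getD j "") := by
  have hz : j < (k.zip r).length := by simp [List.length_zip]; omega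
  rw [List.getD_eq_getElem _ _ hz, List.getD_eq_getElem _ _ hk, List.getD_eq_getElem _ _ hr]
  simp [List.getElem_zip]

-- bridge: A's inner loop on (row, key) is the pair-level loop on the zipped list
theorem pvInnerBridge (j : Nat) (r : List String) (k : List Char)
    (hjk : j < k.length) (hjr : j < r.length) :
    pvInnerA j (r, k) =
      ((pvInnerP j (k.zip r)).map Prod.snd ++ r.drop (k.zip r).length,
       (pvInnerP j (k.zip r)).map Prod.fst ++ k.drop (k.zip r).length) := by
  induction j generalizing r k with
  | zero =>
    simp only [pvInnerA, pvInnerP]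
    rw [pvMapSndZip k r, pvMapFstZip k r]
    rw [List.length_zip]
    rw [List.take_append_drop, List.take_append_drop]
  | succ j ih =>
    have hjk1 : j + 1 < k.length := hjk
    have hjr1 : j + 1 < r.length := hjr
    have hjk' : j < k.length := by omega
    have hjr' : j < r.length := by omega
    rw [pvInnerA, pvInnerP]
    simp only []
    rw [pvGetDZip k r (j+1) hjk1 hjr1, pvGetDZip k r j hjk' hjr']
    by_cases hc : (k.getD (j+1) ' ').toNat < (k.getD j ' ').toNat
    · rw [if_pos hc, if_pos (by simpa using hc)]
      have hzip : ((k.set j (k.getD (j+1) ' ')).set (j+1) (k.getD j ' ')).zip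
            ((r.set j (r.getD (j+1) "")).set (j+1) (r.getD j "")) =
          ((k.zip r).set j (k.getD (j+1) ' ', r.getD (j+1) "")).set (j+1)
            (k.getD j ' ', r.getD j "") := by
        rw [pvZipSet, pvZipSet]
      have hzl : (k.zip r).length = min k.length r.length := List.length_zip ..
      rw [ih _ _ (by simpa using hjk') (by simpa using hjr')]
      rw [hzip]
      simp only [List.length_set]
      rw [List.drop_set_of_lt (by rw [List.length_zip]; omega),
          List.drop_set_of_lt (by rw [List.length_zip]; omega),
          List.drop_set_of_lt (by rw [List.length_zip]; omega),
          List.drop_set_of_lt (by rw [List.length_zip]; omega)]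
    · rw [if_neg hc, if_neg (by simpa using hc)]
      exact ih r k hjk' hjr'

-- a pass over an already-sorted prefix does nothing
theorem pvNoSwap (j : Nat) (zs : List (Char × String))
    (hj : j < zs.length)
    (hs : (zs.take (j + 1)).Pairwise (fun a b => a.1 ≤ b.1)) :
    pvInnerP j zs = zs := by
  induction j with
  | zero => rfl
  | succ j ih =>
    have hj1 : j + 1 < zs.length := hj
    have hjl : j < zs.length := by omega
    have hadj : zs[j].1 ≤ zs[j + 1].1 := by
      have := (List.pairwise_iff_getElem.1 hs) j (j + 1)
        (by simp; omega) (by simp; omega) (by omega)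
      simpa using this
    have hcond : ¬ ((zs.getD (j + 1) (' ', "")).1.toNat < (zs.getD j (' ', "")).1.toNat) := by
      rw [List.getD_eq_getElem _ _ hj1, List.getD_eq_getElem _ _ hjl, pvCharLt]
      exact not_lt.2 hadj
    rw [pvInnerP]
    simp only [hcond, ite_false]
    exact ih (by omega) (by
      have : zs.take (j + 1) = (zs.take (j + 2)).take (j + 1) := by
        rw [List.take_take]; congr 1; omega
      rw [this]
      exact hs.sublist (List.take_sublist _ _))

theorem pvInsertByLast {α : Type} (before : α → α → Bool) (x a : α) (s : List α)
    (h : before x a = true) :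
    PySem.List.insertBy before x (s ++ [a]) = PySem.List.insertBy before x s ++ [a] := by
  induction s with
  | nil => simp [PySem.List.insertBy, h]
  | cons y s ih =>
    by_cases hy : before x y = true
    · simp [PySem.List.insertBy, hy]
    · simp only [List.cons_append, PySem.List.insertBy, hy]
      simp [ih]

-- where insertBy lands: after a prefix of non-'before' elements, in front of the 'before' suffix
theorem pvInsertPos {α : Type} (before : α → α → Bool) (x : α) (P Q : List α)
    (hP : ∀ y ∈ P, before x y = false) (hQ : ∀ y ∈ Q, before x y = true) :
    PySem.List.insertBy before x (P ++ Q) = P ++ x :: Q := by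
  induction P with
  | nil =>
    cases Q with
    | nil => simp [PySem.List.insertBy]
    | cons q Q => simp [PySem.List.insertBy, hQ q (by simp)]
  | cons p P ih =>
    have hp : before x p = false := hP p (by simp)
    simp only [List.cons_append, PySem.List.insertBy, hp]
    simp [ih (fun y hy => hP y (by simp [hy]))]

theorem pvGetDAt {α : Type} [Inhabited α] (u : List α) (y : α) (v : List α) (d : α) :
    (u ++ y :: v).getD u.length d = y := by
  rw [List.getD_eq_getElem _ _ (by simp)]
  simp

theorem pvSetAt {α : Type} (u : List α) (y z : α) (v : List α) :
    (u ++ y :: v).set u.length z = u ++ z :: v := by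
  induction u with
  | nil => simp
  | cons a u ih => simp [ih]

-- the bubbling pass starting at position s.length inserts x into the sorted prefix s
theorem pvInnerIns (s : List (Char × String)) (x : Char × String) (t : List (Char × String))
    (hs : s.Pairwise (fun a b => a.1 ≤ b.1)) :
    pvInnerP s.length (s ++ x :: t) =
      PySem.List.insertBy (fun a b => decide (a.1 < b.1)) x s ++ t := by
  induction s using List.reverseRecOn generalizing x t with
  | nil => simp [pvInnerP, PySem.List.insertBy]
  | append_singleton s a ih =>
    have hlen : (s ++ [a]).length = s.length + 1 := by simp
    have hsa : s.Pairwise (fun a b => a.1 ≤ b.1) ∧ ∀ y ∈ s, y.1 ≤ a.1 := by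
      rw [List.pairwise_append] at hs
      exact ⟨hs.1, fun y hy => hs.2.2 y hy a (by simp)⟩
    have harr : (s ++ [a]) ++ x :: t = s ++ a :: x :: t := by simp
    have hga : ((s ++ [a]) ++ x :: t).getD s.length (' ', "") = a := by
      rw [harr]; exact pvGetDAt s a _ _
    have hgx : ((s ++ [a]) ++ x :: t).getD (s.length + 1) (' ', "") = x := by
      have h2 := pvGetDAt (s ++ [a]) x t (' ', "")
      simpa using h2
    rw [hlen, pvInnerP]
    simp only [hga, hgx]
    by_cases hc : x.1.toNat < a.1.toNat
    · rw [if_pos hc]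
      have hset : (((s ++ [a]) ++ x :: t).set s.length x).set (s.length + 1) a
          = s ++ x :: a :: t := by
        rw [harr, pvSetAt]
        have h1 : s ++ x :: x :: t = (s ++ [x]) ++ x :: t := by simp
        have h2 : s.length + 1 = (s ++ [x]).length := by simp
        rw [h1, h2, pvSetAt]
        simp
      rw [hset]
      rw [ih x (a :: t) hsa.1]
      have hba : (fun p q => decide ((p : Char × String).1 < q.1)) x a = true := by
        simp only [decide_eq_true_eq]
        rw [← pvCharLt]; omega
      rw [pvInsertByLast _ _ _ _ hba]
      simp
    · rw [if_neg hc]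
      have hnos : pvInnerP s.length ((s ++ [a]) ++ x :: t) = (s ++ [a]) ++ x :: t := by
        apply pvNoSwap
        · simp
        · have : ((s ++ [a]) ++ x :: t).take (s.length + 1) = s ++ [a] := by
            rw [List.take_append_of_le_length (by simp), List.take_of_length_le (by simp)]
          rw [this]; exact hs
      rw [hnos]
      have hall : ∀ y ∈ s ++ [a], (fun p q => decide ((p : Char × String).1 < q.1)) x y = false := by
        intro y hy
        rcases List.mem_append.1 hy with hy | hy
        · have h1 : y.1 ≤ a.1 := hsa.2 y hy
          have h2 : ¬ x.1 < a.1 := by rw [← pvCharLt]; omega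
          simp only [decide_eq_false_iff_not]
          intro hlt
          exact h2 (lt_of_lt_of_le hlt h1)
        · simp at hy
          subst hy
          simp only [decide_eq_false_iff_not]
          rw [← pvCharLt]; omega
      rw [PySem.List.insertBy_of_forall_not_before _ _ _ hall]
      simp

theorem pvSortedSnoc {α κ : Type} [LinearOrder κ] (l : List α) (x : α) (key : α → κ) :
    PySem.List.sorted (l ++ [x]) key false =
      PySem.List.insertBy (fun a b => decide (key a < key b)) x (PySem.List.sorted l key false) := by
  rw [PySem.List.sorted_eq_foldl_insertBy, PySem.List.sorted_eq_foldl_insertBy, List.foldl_append]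
  rfl

-- outer loop, pair level: i passes sort the first i pairs
theorem pvOuterP (zs : List (Char × String)) (i : Nat) (hi : i ≤ zs.length) :
    (List.range i).foldl (fun st j => pvInnerP j st) zs =
      PySem.List.sorted (zs.take i) (fun p => p.1) false ++ zs.drop i := by
  induction i with
  | zero => simp [PySem.List.sorted]
  | succ i ih =>
    rw [List.range_succ, List.foldl_append, ih (by omega)]
    simp only [List.foldl_cons, List.foldl_nil]
    have hilt : i < zs.length := by omega
    have hdrop : zs.drop i = zs[i] :: zs.drop (i + 1) := by
      rw [List.drop_eq_getElem_cons hilt]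
    have hlen : (PySem.List.sorted (zs.take i) (fun p => p.1) false).length = i := by
      rw [PySem.List.length_sorted, List.length_take]; omega
    rw [hdrop]
    have := pvInnerIns (PySem.List.sorted (zs.take i) (fun p => p.1) false) zs[i]
      (zs.drop (i + 1)) (PySem.List.sorted_pairwise _ _)
    rw [hlen] at this
    rw [this]
    have htake : zs.take (i + 1) = zs.take i ++ [zs[i]] := by
      rw [List.take_add_one]
      simp [List.getElem?_eq_getElem hilt]
    rw [htake, pvSortedSnoc]

-- a pass never swaps when the whole key list so far is ordered
theorem pvNoSwapA (j : Nat) (r : List String) (kl : List Char) (hj : j < kl.length)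
    (hs : (kl.take (j + 1)).Pairwise (· ≤ ·)) :
    pvInnerA j (r, kl) = (r, kl) := by
  induction j with
  | zero => rfl
  | succ j ih =>
    have hj1 : j + 1 < kl.length := hj
    have hjl : j < kl.length := by omega
    have hadj : kl[j] ≤ kl[j + 1] := by
      have := (List.pairwise_iff_getElem.1 hs) j (j + 1)
        (by simp; omega) (by simp; omega) (by omega)
      simpa using this
    have hcond : ¬ ((kl.getD (j + 1) ' ').toNat < (kl.getD j ' ').toNat) := by
      rw [List.getD_eq_getElem _ _ hj1, List.getD_eq_getElem _ _ hjl, pvCharLt]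
      exact not_lt.2 hadj
    rw [pvInnerA]
    simp only [hcond, ite_false]
    exact ih (by omega) (by
      have : kl.take (j + 1) = (kl.take (j + 2)).take (j + 1) := by
        rw [List.take_take]; congr 1; omega
      rw [this]
      exact hs.sublist (List.take_sublist _ _))

theorem pvZipZero (k : List Char) (r : List String) :
    (k.drop (k.zip r).length).zip (r.drop (k.zip r).length) = [] := by
  apply List.eq_nil_of_length_eq_zero
  rw [List.length_zip, List.length_drop, List.length_drop, List.length_zip]
  omega

-- outer loop, bridged to A's (row, key) state (the zipped prefix plus the untouched tails)
theorem pvOuterBridge (r : List String) (k : List Char)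
    (i : Nat) (hi : i ≤ (k.zip r).length) :
    (List.range i).foldl (fun st j => pvInnerA j st) (r, k) =
      (((List.range i).foldl (fun st j => pvInnerP j st) (k.zip r)).map Prod.snd ++ r.drop (k.zip r).length,
       ((List.range i).foldl (fun st j => pvInnerP j st) (k.zip r)).map Prod.fst ++ k.drop (k.zip r).length) := by
  induction i with
  | zero =>
    simp only [List.range_zero, List.foldl_nil]
    rw [pvMapSndZip k r, pvMapFstZip k r, List.take_append_drop, List.take_append_drop]
  | succ i ih =>
    rw [List.range_succ, List.foldl_append, List.foldl_append, ih (by omega)]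
    simp only [List.foldl_cons, List.foldl_nil]
    set Z := (List.range i).foldl (fun st j => pvInnerP j st) (k.zip r) with hZ
    have hZlen : Z.length = (k.zip r).length := by
      rw [hZ, pvLengthFold]
    have hilt : i < (k.zip r).length := by omega
    have hkl : i < (Z.map Prod.fst ++ k.drop (k.zip r).length).length := by
      simp [hZlen]; rw [List.length_zip] at *; omega
    have hrl : i < (Z.map Prod.snd ++ r.drop (k.zip r).length).length := by
      simp [hZlen]; rw [List.length_zip] at *; omega
    rw [pvInnerBridge i _ _ hkl hrl]
    have hzip : (Z.map Prod.fst ++ k.drop (k.zip r).length).zip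
        (Z.map Prod.snd ++ r.drop (k.zip r).length)
        = Z := by
      rw [List.zip_append (by simp), pvZipZero, List.append_nil,
        pvZipFstSnd]
    rw [hzip, hZlen, List.drop_left' (by simp [hZlen]), List.drop_left' (by simp [hZlen])]

-- under Pre_, after the zipped prefix is sorted the whole key list is ordered
theorem pvFullSorted (k : List Char) (r : List String)
    (hPre : ∀ i, i < k.length → r.length ≤ i → ∀ j, j < i → k.getD j ' ' ≤ k.getD i ' ') :
    ((PySem.List.sorted (k.zip r) (fun p => p.1) false).map Prod.fst
      ++ k.drop (k.zip r).length).Pairwise (· ≤ ·) := by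
  set zs := k.zip r with hzs
  have hρ : zs.length = min k.length r.length := List.length_zip ..
  rw [List.pairwise_append]
  refine ⟨?_, ?_, ?_⟩
  · rw [List.pairwise_map]
    exact PySem.List.sorted_pairwise _ _
  · rw [List.pairwise_iff_getElem]
    intro p q hp hq hpq
    rw [List.getElem_drop, List.getElem_drop]
    have h1 : zs.length + q < k.length := by
      rw [List.length_drop] at hq; omega
    have h2 : r.length ≤ zs.length + q := by omega
    have := hPre (zs.length + q) h1 h2 (zs.length + p) (by omega)
    rwa [List.getD_eq_getElem _ _ (by omega), List.getD_eq_getElem _ _ h1] at this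
  · intro c hc c' hc'
    -- c is a key char of the zipped prefix, c' a tail char; Pre_ gives c ≤ c'
    have hcm : c ∈ zs.map Prod.fst :=
      ((PySem.List.sorted_perm zs (fun p => p.1) false).map Prod.fst).mem_iff.1 hc
    rw [pvMapFstZip] at hcm
    obtain ⟨j, hj, hjc⟩ := List.mem_iff_getElem.1 hcm
    have hjlt : j < zs.length := by
      have := hj; simp [List.length_take] at this; omega
    obtain ⟨p, hp, rfl⟩ := List.mem_iff_getElem.1 hc'
    rw [List.getElem_drop]
    have h1 : zs.length + p < k.length := by
      rw [List.length_drop] at hp; omega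
    have h2 : r.length ≤ zs.length + p := by omega
    have := hPre (zs.length + p) h1 h2 j (by omega)
    rw [List.getD_eq_getElem _ _ (by omega), List.getD_eq_getElem _ _ h1] at this
    rw [← hjc, List.getElem_take]
    exact this

theorem pvFlatMapCongr {α β : Type} (D : List α) (f g : α → List β)
    (h : ∀ c ∈ D, f c = g c) : D.flatMap f = D.flatMap g := by
  induction D with
  | nil => rfl
  | cons c D ih =>
    simp only [List.flatMap_cons, h c (by simp),
      ih (fun c hc => h c (by simp [hc]))]

theorem pvDropWhileGt (D : List Char) (a : Char) (hD : D.Pairwise (· < ·)) :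
    ∀ c ∈ D.dropWhile (fun c => !decide (a < c)), a < c := by
  induction D with
  | nil => simp
  | cons d D ih =>
    intro c hc
    rw [List.dropWhile_cons] at hc
    by_cases hd : a < d
    · simp [hd] at hc
      rcases hc with rfl | h
      · exact hd
      · exact lt_trans hd ((List.pairwise_cons.1 hD).1 c h)
    · simp [hd] at hc
      exact ih (List.pairwise_cons.1 hD).2 c hc

theorem pvLastOfMax (P : List Char) (a : Char) (hP : P.Pairwise (· < ·)) (ha : a ∈ P)
    (hmax : ∀ c ∈ P, ¬ a < c) : ∃ E, P = E ++ [a] ∧ ∀ c ∈ E, c < a := by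
  induction P with
  | nil => simp at ha
  | cons b P ih =>
    rcases List.mem_cons.1 ha with rfl | ha'
    · have : P = [] := by
        cases P with
        | nil => rfl
        | cons q P' =>
          exact absurd ((List.pairwise_cons.1 hP).1 q (by simp)) (hmax q (by simp))
      exact ⟨[], by simp [this], by simp⟩
    · obtain ⟨E, hE, hlt⟩ := ih (List.pairwise_cons.1 hP).2 ha'
        (fun c hc => hmax c (by simp [hc]))
      refine ⟨b :: E, by simp [hE], ?_⟩
      intro c hc
      rcases List.mem_cons.1 hc with rfl | hc'
      · exact (List.pairwise_cons.1 hP).1 a ha'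
      · exact hlt c hc'

theorem pvOfListSnoc {α : Type} [BEq α] (ys : List α) (c : α) :
    PySem.Set.ofList (ys ++ [c]) = PySem.Set.add (PySem.Set.ofList ys) c := by
  simp [PySem.Set.ofList, List.foldl_append]

-- CRUX: a stable sort by the first component is the concatenation, in sorted order of the
-- distinct key characters, of the per-character buckets
theorem pvCrux (L : List (Char × String)) :
    PySem.List.sorted L (fun p => p.1) false =
      (PySem.List.sorted (PySem.Set.ofList (L.map (fun p => p.1))) (fun c => c) false).flatMap
        (fun c => L.filter (fun p => p.1 == c)) := by
  induction L using List.reverseRecOn with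
  | nil => rfl
  | append_singleton L x ih =>
    set S := PySem.Set.ofList (L.map (fun p => p.1)) with hS
    set D := PySem.List.sorted S (fun c => c) false with hDdef
    have hD : D.Pairwise (· < ·) := PySem.List.sorted_ofList_pairwise_lt _
    have hmemD : ∀ c, c ∈ D ↔ c ∈ L.map (fun p => p.1) := by
      intro c
      rw [hDdef, PySem.List.mem_sorted, hS, PySem.Set.mem_ofList]
    set Bk := fun c => L.filter (fun p => p.1 == c) with hBk
    set Bk' := fun c => (L ++ [x]).filter (fun p => p.1 == c) with hBk'
    have hBkSplit : ∀ c, Bk' c = Bk c ++ (if x.1 == c then [x] else []) := by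
      intro c
      show (L ++ [x]).filter (fun p => p.1 == c) = L.filter (fun p => p.1 == c) ++ _
      rw [List.filter_append]
      congr 1
      by_cases h : x.1 = c
      · simp [h, List.filter]
      · have hb : (x.1 == c) = false := beq_eq_false_iff_ne.2 h
        simp [List.filter, hb]
    set D₁ := D.takeWhile (fun c => !decide (x.1 < c)) with hD₁
    set D₂ := D.dropWhile (fun c => !decide (x.1 < c)) with hD₂
    have hDsplit : D = D₁ ++ D₂ := (List.takeWhile_append_dropWhile ..).symm
    have hD₁mem : ∀ c ∈ D₁, ¬ x.1 < c := by
      intro c hc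
      have := List.mem_takeWhile_imp hc
      simpa using this
    have hD₂mem : ∀ c ∈ D₂, x.1 < c := pvDropWhileGt D x.1 hD
    have hLHS : PySem.List.sorted (L ++ [x]) (fun p => p.1) false
        = D₁.flatMap Bk ++ x :: D₂.flatMap Bk := by
      rw [pvSortedSnoc, ih, hDsplit, List.flatMap_append]
      apply pvInsertPos
      · intro y hy
        obtain ⟨c, hc, hyc⟩ := List.mem_flatMap.1 hy
        have hy1 : y.1 = c := by
          have := List.of_mem_filter hyc
          simpa using this
        simp only [decide_eq_false_iff_not]
        rw [hy1]; exact hD₁mem c hc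
      · intro y hy
        obtain ⟨c, hc, hyc⟩ := List.mem_flatMap.1 hy
        have hy1 : y.1 = c := by
          have := List.of_mem_filter hyc
          simpa using this
        simp only [decide_eq_true_eq]
        rw [hy1]; exact hD₂mem c hc
    rw [hLHS]
    have hmap : (L ++ [x]).map (fun p => p.1) = L.map (fun p => p.1) ++ [x.1] := by simp
    rw [hmap, pvOfListSnoc, ← hS]
    by_cases hx : x.1 ∈ L.map (fun p => p.1)
    · -- x.1 already a key: the bucket of x.1 (last inside D₁) gains x at its end
      have hadd : PySem.Set.add S x.1 = S := by
        rw [PySem.Set.add]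
        rw [if_pos]
        rw [PySem.Set.contains_eq_decide]
        simpa [hS, PySem.Set.mem_ofList] using hx
      rw [hadd, ← hDdef]
      have hx1D : x.1 ∈ D := (hmemD x.1).2 hx
      have hx1D₁ : x.1 ∈ D₁ := by
        rcases List.mem_append.1 (hDsplit ▸ hx1D) with h | h
        · exact h
        · exact absurd (hD₂mem _ h) (lt_irrefl _)
      have hD₁pw : D₁.Pairwise (· < ·) := hD.sublist (List.takeWhile_sublist _)
      obtain ⟨E, hE, hElt⟩ := pvLastOfMax D₁ x.1 hD₁pw hx1D₁ hD₁mem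
      have hneE : ∀ c ∈ E, Bk' c = Bk c := by
        intro c hc
        rw [hBkSplit]
        have : ¬ (x.1 = c) := ne_of_gt (hElt c hc)
        simp [this]
      have hneD₂ : ∀ c ∈ D₂, Bk' c = Bk c := by
        intro c hc
        rw [hBkSplit]
        have : ¬ (x.1 = c) := ne_of_lt (hD₂mem c hc)
        simp [this]
      have hBx : Bk' x.1 = Bk x.1 ++ [x] := by
        rw [hBkSplit]; simp
      calc D₁.flatMap Bk ++ x :: D₂.flatMap Bk
          = (E.flatMap Bk ++ Bk x.1) ++ x :: D₂.flatMap Bk := by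
            rw [hE, List.flatMap_append]; simp
        _ = D.flatMap Bk' := by
            rw [hDsplit, List.flatMap_append, hE, List.flatMap_append,
              pvFlatMapCongr E Bk' Bk hneE, pvFlatMapCongr D₂ Bk' Bk hneD₂]
            simp [hBx]
    · -- new key: it is inserted between D₁ and D₂, with the singleton bucket [x]
      have hadd : PySem.Set.add S x.1 = S ++ [x.1] := by
        rw [PySem.Set.add, if_neg]
        rw [PySem.Set.contains_eq_decide]
        simpa [hS, PySem.Set.mem_ofList] using hx
      rw [hadd]
      have hsorted : PySem.List.sorted (S ++ [x.1]) (fun c => c) false = D₁ ++ x.1 :: D₂ := by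
        rw [pvSortedSnoc, ← hDdef, hDsplit]
        apply pvInsertPos
        · intro c hc; simpa using hD₁mem c hc
        · intro c hc; simpa using hD₂mem c hc
      rw [hsorted, List.flatMap_append, List.flatMap_cons]
      have hne : ∀ c ∈ D, Bk' c = Bk c := by
        intro c hc
        rw [hBkSplit]
        have : ¬ (x.1 = c) := by
          rintro rfl; exact hx ((hmemD x.1).1 hc)
        simp [this]
      have hBx : Bk' x.1 = [x] := by
        rw [hBkSplit]
        have hnil : Bk x.1 = [] := by
          rw [hBk, List.filter_eq_nil_iff]
          intro p hp hpx
          exact hx (by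
            have : p.1 = x.1 := by simpa using hpx
            exact this ▸ List.mem_map_of_mem hp)
        simp [hnil]
      rw [hBx,
        pvFlatMapCongr D₁ Bk' Bk (fun c hc => hne c (hDsplit ▸ List.mem_append_left _ hc)),
        pvFlatMapCongr D₂ Bk' Bk (fun c hc => hne c (hDsplit ▸ List.mem_append_right _ hc))]
      simp

-- ===== VERDICT (by name: the statements are the Claim_ definitions above) =====
theorem sort_row_spec : Claim_equal_sort_row := by
  intro key row_l hdom hpre
  unfold Spec_sort_row
  unfold Pre_sort_row at hpre
  -- A's side: reduce to the stable sort of the zipped pairs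
  have hA : sort_row key row_l =
      (PySem.List.sorted (key.toList.zip row_l) (fun p => p.1) false).map Prod.snd
        ++ row_l.drop (key.toList.zip row_l).length := by
    set k := key.toList with hk
    set r := row_l with hr
    set zs := k.zip r with hzs
    have hρ : zs.length = min k.length r.length := List.length_zip ..
    have hstate : ∀ i, zs.length ≤ i → i ≤ k.length →
        (List.range i).foldl (fun st j => pvInnerA j st) (r, k) =
          ((PySem.List.sorted zs (fun p => p.1) false).map Prod.snd ++ r.drop zs.length,
           (PySem.List.sorted zs (fun p => p.1) false).map Prod.fst ++ k.drop zs.length) := by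
      intro i hi1 hi2
      induction i, hi1 using Nat.le_induction with
      | base =>
        rw [pvOuterBridge r k zs.length le_rfl, pvOuterP zs zs.length le_rfl]
        rw [List.take_of_length_le le_rfl, List.drop_length, List.append_nil]
      | succ i hi ih =>
        rw [List.range_succ, List.foldl_append, ih (by omega)]
        simp only [List.foldl_cons, List.foldl_nil]
        apply pvNoSwapA
        · simp only [List.length_append, List.length_map, PySem.List.length_sorted,
            List.length_drop]
          omega
        · exact (pvFullSorted k r hpre).sublist (List.take_sublist _ _)
    show ((List.range (k.foldl (fun acc c => acc ++ [c]) []).length).foldl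
        (fun st i => pvInnerA i st) (r, k.foldl (fun acc c => acc ++ [c]) [])).1 = _
    rw [PySem.List.foldl_append_singleton, List.nil_append]
    rw [hstate k.length (by omega) le_rfl]
  -- B's side: reduce to buckets concatenated in sorted character order
  have hB : sort_row_alt key row_l =
      (PySem.List.sorted (PySem.Set.ofList ((key.toList.zip row_l).map (fun p => p.1)))
          (fun c => c) false).flatMap
        (fun c => ((key.toList.zip row_l).filter (fun p => p.1 == c)).map Prod.snd)
        ++ row_l.drop key.toList.length := by
    show (PySem.List.sorted
        ((key.toList.zip row_l).foldl
          (fun d p => d.modify p.1 [] (fun v => v ++ [p.2])) PySem.Dict.empty).keys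
        (fun c => c) false).foldl
        (fun acc c => acc ++
          ((key.toList.zip row_l).foldl
            (fun d p => d.modify p.1 [] (fun v => v ++ [p.2])) PySem.Dict.empty).getD c []) []
        ++ PySem.List.slice row_l (some (PySem.Str.len key)) none = _
    rw [PySem.Dict.keys_foldl_modify_key (key.toList.zip row_l) (fun p => p.1) []
      (fun d p => fun v => v ++ [p.2]) PySem.Dict.empty]
    rw [PySem.Dict.keys_empty, PySem.Set.update_nil_left]
    rw [PySem.List.foldl_append_eq_flatMap, List.nil_append]
    rw [pvFlatMapCongr _ _
      (fun c => ((key.toList.zip row_l).filter (fun p => p.1 == c)).map Prod.snd)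
      (fun c _ => by
        rw [PySem.Dict.getD_foldl_modify_append, PySem.Dict.getD_empty, List.nil_append])]
    congr 1
    rw [PySem.List.slice_from row_l (by rw [PySem.Str.len_eq]; positivity)]
    rw [PySem.Str.len_eq]
    simp
  have hdrop : row_l.drop (key.toList.zip row_l).length = row_l.drop key.toList.length := by
    rcases Nat.le_total key.toList.length row_l.length with h | h
    · rw [List.length_zip]; congr 1; omega
    · rw [List.drop_of_length_le (by rw [List.length_zip]; omega),
        List.drop_of_length_le (by omega)]
  rw [hA, hB, hdrop, pvCrux, List.map_flatMap]
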